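-- pv_equiv track=rewrite | github.com/toylim/paperwork | paperwork-shell/src/paperwork_shell/cmd/about/__init__.py | _group_small_words
-- ===== SOURCE A (Python) =====
-- def _group_small_words(words):
--     buf = []
--     for word in words:
--         buf.append(word)
--         if len(word) > 3:
--             yield " ".join(buf)
--             buf = []
--     if len(buf) > 0:
--         yield " ".join(buf)
-- ===== SOURCE B (Python) =====
-- def _group_small_words(words):
--     # Boundary-index decomposition: find each word longer than 3, emit the
--     # slice from the previous boundary (exclusive) up to it (inclusive),
--     # then the trailing slice if nonempty.
--     words = list(words)
--     start = 0
--     for i, word in enumerate(words):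
--         if len(word) > 3:
--             yield " ".join(words[start:i + 1])
--             start = i + 1
--     if start < len(words):
--         yield " ".join(words[start:])
-- ===== Notes on version B (the rewrite author's own statement) =====
-- stated objective: alternative
-- what changed: Replaces the streaming buffer that accumulates words with a boundary-index scan that keeps only the start index of the current group and emits slices of the word list between consecutive boundaries.
import Mathlib
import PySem

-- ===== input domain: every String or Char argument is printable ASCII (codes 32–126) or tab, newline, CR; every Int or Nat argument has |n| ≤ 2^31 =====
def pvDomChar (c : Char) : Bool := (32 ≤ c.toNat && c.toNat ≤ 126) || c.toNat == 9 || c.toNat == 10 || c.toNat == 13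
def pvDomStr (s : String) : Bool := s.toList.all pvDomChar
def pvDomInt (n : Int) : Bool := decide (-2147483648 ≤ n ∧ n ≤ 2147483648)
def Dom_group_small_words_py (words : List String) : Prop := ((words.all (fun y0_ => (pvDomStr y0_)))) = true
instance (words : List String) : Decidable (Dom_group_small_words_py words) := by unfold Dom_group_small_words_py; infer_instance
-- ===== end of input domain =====

-- B groups words by precomputing boundary positions (words longer than 3) and emitting
-- slices between consecutive boundaries, instead of A's streaming buffer (alternative decomposition).

-- ===== PORT A =====
-- step of A's loop: append word to buf; on a long word flush the joined buf
def pyAstep (st : List String × List String) (word : String) : List String × List String :=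
  let buf := st.1 ++ [word]
  if PySem.Str.len word > 3 then ([], st.2 ++ [PySem.Str.join " " buf]) else (buf, st.2)

def group_small_words_py (words : List String) : List String :=
  let s := words.foldl pyAstep ([], [])
  if PySem.List.len s.1 > 0 then s.2 ++ [PySem.Str.join " " s.1] else s.2

-- ===== PORT B =====
-- step of B's loop: on a long word at index i, emit words[start:i+1] and move start to i+1
def pyBstep (words : List String) (st : Int × List String) (iw : Int × String) : Int × List String :=
  if PySem.Str.len iw.2 > 3 then
    (iw.1 + 1, st.2 ++ [PySem.Str.join " " (PySem.List.slice words (some st.1) (some (iw.1 + 1)))])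
  else st

def group_small_words_py_alt (words : List String) : List String :=
  let s := (PySem.List.enumerate words 0).foldl (pyBstep words) (0, [])
  if s.1 < PySem.List.len words then
    s.2 ++ [PySem.Str.join " " (PySem.List.slice words (some s.1) none)]
  else s.2

-- ===== PRECONDITION & SPEC =====
def Spec_group_small_words_py (words : List String) (out : List String) : Prop := out = group_small_words_py_alt words
instance (words : List String) (out : List String) : Decidable (Spec_group_small_words_py words out) := by unfold Spec_group_small_words_py; infer_instance

-- ===== CLAIM (what is proved, stated in full; the proofs are below) =====
def Claim_equal_group_small_words_py : Prop := ∀ (words : List String), Dom_group_small_words_py words → Spec_group_small_words_py words (group_small_words_py words)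

-- ===== LEMMAS AND PROOFS =====

-- common recursive characterisation of the grouping
def gGo : List String → List String → List String
  | buf, [] => if buf.length > 0 then [PySem.Str.join " " buf] else []
  | buf, w :: ws =>
      if PySem.Str.len w > 3 then PySem.Str.join " " (buf ++ [w]) :: gGo [] ws
      else gGo (buf ++ [w]) ws

lemma A_loop : ∀ (ws buf out : List String),
    (let s := ws.foldl pyAstep (buf, out);
     if PySem.List.len s.1 > 0 then s.2 ++ [PySem.Str.join " " s.1] else s.2)
    = out ++ gGo buf ws := by
  intro ws
  induction ws with
  | nil =>
      intro buf out
      simp only [List.foldl_nil, gGo]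
      by_cases h : buf.length > 0
      · have h' : PySem.List.len buf > 0 := by
          simp only [PySem.List.len_eq]; exact_mod_cast h
        rw [if_pos h', if_pos h]
      · have hbuf : buf = [] := List.eq_nil_of_length_eq_zero (by omega)
        subst hbuf
        simp [PySem.List.len_eq]
  | cons w ws ih =>
      intro buf out
      simp only [List.foldl_cons, pyAstep, gGo]
      by_cases h : PySem.Str.len w > 3
      · simp only [if_pos h]
        rw [ih]
        simp
      · simp only [if_neg h]
        rw [ih]

lemma B_loop : ∀ (ws c buf out : List String) (L : List String), L = c ++ buf ++ ws →
    (let s := (PySem.List.enumerate ws ((c.length : Int) + (buf.length : Int))).foldl (pyBstep L)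
        ((c.length : Int), out);
     if s.1 < PySem.List.len L then s.2 ++ [PySem.Str.join " " (PySem.List.slice L (some s.1) none)]
     else s.2)
    = out ++ gGo buf ws := by
  intro ws
  induction ws with
  | nil =>
      intro c buf out L hL
      simp only [PySem.List.enumerate_nil, List.foldl_nil, gGo]
      have hlen : PySem.List.len L = ((c.length + buf.length : Nat) : Int) := by
        simp [hL, PySem.List.len_eq]
      by_cases h : buf.length > 0
      · have hlt : ((c.length : Int)) < PySem.List.len L := by rw [hlen]; push_cast; omega
        rw [if_pos hlt, if_pos h]
        rw [PySem.List.slice_from_natCast]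
        simp [hL]
      · have hbuf : buf = [] := List.eq_nil_of_length_eq_zero (by omega)
        subst hbuf
        have hge : ¬ ((c.length : Int)) < PySem.List.len L := by
          rw [hlen]; push_cast; omega
        rw [if_neg hge, if_neg h]
        simp
  | cons w ws ih =>
      intro c buf out L hL
      rw [PySem.List.enumerate_cons]
      simp only [List.foldl_cons, pyBstep, gGo]
      by_cases h : PySem.Str.len w > 3
      · simp only [if_pos h]
        have harg2 : ((c.length : Int) + (buf.length : Int) + 1)
            = (((c ++ buf ++ [w]).length : Nat) : Int) := by simp; ring
        have hslice : PySem.List.slice L (some (c.length : Int))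
            (some ((c.length : Int) + (buf.length : Int) + 1)) = buf ++ [w] := by
          have hc : ((c.length : Int) + (buf.length : Int) + 1)
              = ((c.length + (buf.length + 1) : Nat) : Int) := by push_cast; ring
          rw [hc, PySem.List.slice_natCast, hL, List.append_assoc, List.drop_left]
          have h2 : c.length + (buf.length + 1) - c.length = buf.length + 1 := by omega
          rw [h2, List.take_append]
          simp
        rw [hslice, harg2]
        have hL' : L = (c ++ buf ++ [w]) ++ ([] : List String) ++ ws := by simp [hL]
        have hih := ih (c ++ buf ++ [w]) [] (out ++ [PySem.Str.join " " (buf ++ [w])]) L hL'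
        simp only [List.length_nil, Nat.cast_zero, add_zero] at hih
        rw [hih]
        simp
      · simp only [if_neg h]
        have hL' : L = c ++ (buf ++ [w]) ++ ws := by simp [hL]
        have hih := ih c (buf ++ [w]) out L hL'
        have harg : ((c.length : Int) + (buf.length : Int) + 1)
            = ((c.length : Int) + (((buf ++ [w]).length : Nat) : Int)) := by
          simp; ring
        rw [harg]
        exact hih

-- ===== VERDICT (by name: the statement is the Claim_ definition above) =====
theorem group_small_words_py_spec : Claim_equal_group_small_words_py := by
  intro words _
  unfold Spec_group_small_words_py group_small_words_py group_small_words_py_alt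
  have hA := A_loop words [] []
  have hB := B_loop words [] [] [] words (by simp)
  simp only [List.length_nil, Nat.cast_zero, add_zero, List.nil_append] at hA hB
  rw [hA, ← hB]
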